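-- pv_equiv track=rewrite | github.com/karmab/kcli | kvirt/jinjafilters/__init__.py | defaultnodes
-- ===== SOURCE A (Python) =====
-- def defaultnodes(replicas, cluster, domain, masters, workers):
--     nodes = []
--     for num in range(workers):
--         if len(nodes) < replicas:
--             nodes.append('%s-worker-%d.%s' % (cluster, num, domain))
--     for num in range(masters):
--         if len(nodes) < replicas:
--             nodes.append('%s-master-%d.%s' % (cluster, num, domain))
--     return nodes
-- ===== SOURCE B (Python) =====
-- def defaultnodes(replicas, cluster, domain, masters, workers):
--     w = max(workers, 0)
--     m = max(masters, 0)
--     n = min(max(replicas, 0), w + m)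
--     return ['%s-worker-%d.%s' % (cluster, i, domain) if i < w
--             else '%s-master-%d.%s' % (cluster, i - w, domain)
--             for i in range(n)]
-- ===== Notes on version B (the rewrite author's own statement) =====
-- stated objective: alternative
-- what changed: Replaces the two guarded accumulation loops with a single comprehension over the exact output length min(max(replicas,0), workers+masters), computing each hostname directly from its output index (worker if i < workers, else master i - workers), so no guard checks and no discarded names are ever built.
import Mathlib
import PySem

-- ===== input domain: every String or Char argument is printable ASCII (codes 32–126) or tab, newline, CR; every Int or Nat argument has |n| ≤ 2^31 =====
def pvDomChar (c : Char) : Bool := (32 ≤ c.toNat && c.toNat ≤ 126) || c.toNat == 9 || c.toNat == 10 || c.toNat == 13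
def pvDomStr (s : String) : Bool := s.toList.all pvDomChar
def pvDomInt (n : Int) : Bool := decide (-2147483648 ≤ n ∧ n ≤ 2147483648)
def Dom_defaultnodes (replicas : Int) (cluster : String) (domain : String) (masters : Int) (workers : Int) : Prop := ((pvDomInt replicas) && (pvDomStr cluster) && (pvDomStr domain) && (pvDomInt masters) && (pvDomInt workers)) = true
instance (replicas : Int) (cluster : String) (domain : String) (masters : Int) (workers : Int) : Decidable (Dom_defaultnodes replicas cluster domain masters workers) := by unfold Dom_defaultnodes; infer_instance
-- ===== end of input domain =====

-- B computes each hostname directly from its output index in a single pass of length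
-- min(max(replicas,0), workers+masters) — no guarded accumulation; alternative decomposition, same cost.

-- ===== PORT A =====
-- Port of A: two passes over range(workers)/range(masters), appending while len(nodes) < replicas.
def defaultnodes (replicas : Int) (cluster : String) (domain : String) (masters : Int) (workers : Int) : List String :=
  let nodes : List String :=
    (PySem.List.pyRange 0 workers 1).foldl
      (fun nodes num =>
        if (nodes.length : Int) < replicas then
          nodes ++ [cluster ++ "-worker-" ++ PySem.Int.toStr num ++ "." ++ domain]
        else nodes) []
  (PySem.List.pyRange 0 masters 1).foldl
    (fun nodes num =>
      if (nodes.length : Int) < replicas then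
        nodes ++ [cluster ++ "-master-" ++ PySem.Int.toStr num ++ "." ++ domain]
      else nodes) nodes

-- ===== PORT B =====
-- Port of B: single comprehension over the exact output length; each name computed from its index.
def defaultnodes_alt (replicas : Int) (cluster : String) (domain : String) (masters : Int) (workers : Int) : List String :=
  let w := max workers 0
  let m := max masters 0
  let n := min (max replicas 0) (w + m)
  (PySem.List.pyRange 0 n 1).map (fun i =>
    if i < w then cluster ++ "-worker-" ++ PySem.Int.toStr i ++ "." ++ domain
    else cluster ++ "-master-" ++ PySem.Int.toStr (i - w) ++ "." ++ domain)

-- ===== PRECONDITION & SPEC =====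
def Spec_defaultnodes (replicas : Int) (cluster : String) (domain : String) (masters : Int) (workers : Int) (out : List String) : Prop := out = defaultnodes_alt replicas cluster domain masters workers
instance (replicas : Int) (cluster : String) (domain : String) (masters : Int) (workers : Int) (out : List String) : Decidable (Spec_defaultnodes replicas cluster domain masters workers out) := by unfold Spec_defaultnodes; infer_instance

-- ===== CLAIM =====
def Claim_equal_defaultnodes : Prop := ∀ (replicas : Int) (cluster : String) (domain : String) (masters : Int) (workers : Int), Dom_defaultnodes replicas cluster domain masters workers → Spec_defaultnodes replicas cluster domain masters workers (defaultnodes replicas cluster domain masters workers)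

-- ===== LEMMAS AND PROOFS =====

-- One guarded-append pass over any list equals appending a prefix of the mapped list.
theorem foldGuard_eq_take {α : Type} (f : α → String) (r : Int) :
    ∀ (L : List α) (acc : List String),
      L.foldl (fun nodes x => if (nodes.length : Int) < r then nodes ++ [f x] else nodes) acc
        = acc ++ (L.map f).take (r - acc.length).toNat := by
  intro L
  induction L with
  | nil => intro acc; simp
  | cons x L ih =>
    intro acc
    by_cases h : (acc.length : Int) < r
    · have h1 : (r - acc.length).toNat = (r - (acc ++ [f x]).length).toNat + 1 := by
        simp; omega
      simp only [List.foldl_cons, if_pos h, ih, List.map_cons, h1, List.take_succ_cons]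
      simp
    · have h0 : (r - acc.length).toNat = 0 := by omega
      simp only [List.foldl_cons, if_neg h, ih, h0, List.take_zero, List.append_nil]

-- Truncated concatenation of two index-generated lists = single generation over the output indices.
theorem take_append_eq_mapRange (f g : Int → String) (t wk mk : Nat) :
    ((List.range wk).map (fun j : Nat => f j)).take t
      ++ ((List.range mk).map (fun j : Nat => g j)).take (t - wk)
    = (List.range (min t (wk + mk))).map
        (fun i : Nat => if (i : Int) < (wk : Int) then f i else g ((i : Int) - wk)) := by
  apply List.ext_getElem
  · simp; omega
  · intro i h1 h2
    simp only [List.getElem_map, List.getElem_range] at *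
    simp only [List.length_append, List.length_take, List.length_map, List.length_range] at h1
    rw [List.getElem_append]
    split
    · next hlt =>
      simp only [List.length_take, List.length_map, List.length_range] at hlt
      rw [List.getElem_take, List.getElem_map, List.getElem_range]
      have : (i : Int) < (wk : Int) := by omega
      rw [if_pos this]
    · next hge =>
      simp only [List.length_take, List.length_map, List.length_range] at hge ⊢
      rw [List.getElem_take, List.getElem_map, List.getElem_range]
      have hiw : wk ≤ i := by omega
      have : ¬ (i : Int) < (wk : Int) := by omega
      rw [if_neg this]
      congr 1
      have hmin : min t wk = wk := by omega
      rw [hmin]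
      omega

-- ===== VERDICT =====
theorem defaultnodes_spec : Claim_equal_defaultnodes := by
  intro replicas cluster domain masters workers _
  unfold Spec_defaultnodes defaultnodes defaultnodes_alt
  simp only [foldGuard_eq_take, List.nil_append, List.length_nil, Nat.cast_zero, Int.sub_zero,
    List.length_take, List.length_map, List.length_range, PySem.List.pyRange_one, List.map_map,
    Int.zero_add]
  set f : Int → String := fun i => cluster ++ "-worker-" ++ PySem.Int.toStr i ++ "." ++ domain with hf
  set g : Int → String := fun i => cluster ++ "-master-" ++ PySem.Int.toStr i ++ "." ++ domain with hg
  have hn : (min (max replicas 0) (max workers 0 + max masters 0)).toNat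
      = min replicas.toNat (workers.toNat + masters.toNat) := by omega
  have htake : (replicas - ((min replicas.toNat workers.toNat : Nat) : Int)).toNat
      = replicas.toNat - workers.toNat := by omega
  rw [hn, htake]
  have key := take_append_eq_mapRange f g replicas.toNat workers.toNat masters.toNat
  simp only [Function.comp_def]
  rw [key]
  apply List.map_congr_left
  intro i hi
  have hwcast : ((workers.toNat : Int)) = max workers 0 := by omega
  rw [hwcast]
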